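-- pv_equiv track=rewrite | github.com/RishabhPathak93/Image_Captioning | src/train.py | load_captions
-- ===== SOURCE A (Python) =====
-- def load_captions(captions):
--     mapping = {}
--     for line in captions.strip().split('\n'):
--         tokens = line.strip().split(',')
--         if len(tokens) < 2:
--             continue
--         image_id, caption = tokens[0], tokens[1]
--         image_id = image_id.split('#')[0]
--         if image_id not in mapping:
--             mapping[image_id] = []
--         mapping[image_id].append(caption)
--     return mapping
-- ===== SOURCE B (Python) =====
-- def load_captions(captions):
--     pairs = []
--     for line in captions.strip().split('\n'):
--         tokens = line.strip().split(',')
--         if len(tokens) >= 2: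
--             pairs.append((tokens[0].split('#')[0], tokens[1]))
--     keys = list(dict.fromkeys(k for k, _ in pairs))
--     return {k: [c for i, c in pairs if i == k] for k in keys}
-- ===== Notes on version B (the rewrite author's own statement) =====
-- stated objective: alternative
-- what changed: Replaces the single-pass hash-bucketing dict-of-lists accumulation with a two-phase scheme: first parse all lines into an (image_id, caption) pair list, then dedupe the keys in first-appearance order and build each image's caption list by a per-key filtering pass over the pairs.
import Mathlib
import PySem

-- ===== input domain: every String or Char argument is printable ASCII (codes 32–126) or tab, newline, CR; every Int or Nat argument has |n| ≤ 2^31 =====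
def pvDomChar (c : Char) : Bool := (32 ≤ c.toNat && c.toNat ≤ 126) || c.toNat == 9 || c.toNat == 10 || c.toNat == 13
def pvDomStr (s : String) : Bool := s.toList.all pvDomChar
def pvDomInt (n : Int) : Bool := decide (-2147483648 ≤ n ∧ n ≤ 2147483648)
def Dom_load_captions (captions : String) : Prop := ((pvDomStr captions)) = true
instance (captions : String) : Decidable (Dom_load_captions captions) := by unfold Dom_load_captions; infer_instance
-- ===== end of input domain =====

-- B replaces A's single-pass dict-of-lists bucketing by parse-all-pairs, dedupe keys, then a
-- per-key filtering pass; same return value (alternative decomposition, not claimed faster).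

-- s.split(sep) for a nonempty literal separator (split? is none only for sep = "")
def pvSplit (s sep : String) : List String := (PySem.Str.split? s sep).getD []

-- ===== PORT A =====
-- the loop body of A (one line: parse, skip short lines, bucket the caption under its image id)
def pvStepA (mapping : PySem.Dict String (List String)) (line : String) : PySem.Dict String (List String) :=
  let tokens := pvSplit (PySem.Str.strip line) ","
  if tokens.length < 2 then mapping
  else
    let image_id0 := tokens.getD 0 ""
    let caption := tokens.getD 1 ""
    let image_id := (pvSplit image_id0 "#").getD 0 ""
    let mapping' := if mapping.contains image_id then mapping else mapping.insert image_id []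
    mapping'.modify image_id [] (· ++ [caption])

def load_captions (captions : String) : List (String × List String) :=
  ((pvSplit (PySem.Str.strip captions) "\n").foldl pvStepA PySem.Dict.empty).items

-- ===== PORT B =====
def pvParse (line : String) : Option (String × String) :=
  let tokens := pvSplit (PySem.Str.strip line) ","
  if tokens.length ≥ 2 then
    some ((pvSplit (tokens.getD 0 "") "#").getD 0 "", tokens.getD 1 "")
  else none

def load_captions_alt (captions : String) : List (String × List String) :=
  let pairs := (pvSplit (PySem.Str.strip captions) "\n").filterMap pvParse
  let keys := PySem.List.dedup (pairs.map (·.1))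
  keys.map (fun k => (k, (pairs.filter (fun p => p.1 == k)).map (·.2)))

-- ===== PRECONDITION & SPEC =====
def Spec_load_captions (captions : String) (out : List (String × List String)) : Prop := out = load_captions_alt captions
instance (captions : String) (out : List (String × List String)) : Decidable (Spec_load_captions captions out) := by unfold Spec_load_captions; infer_instance

-- ===== CLAIM (what is proved, stated in full; the proofs are below) =====
def Claim_equal_load_captions : Prop := ∀ (captions : String), Dom_load_captions captions → Spec_load_captions captions (load_captions captions)

-- ===== LEMMAS AND PROOFS =====

-- A's "insert [] if absent, then append" is one Dict.modify
theorem pvStep_eq_modify (d : PySem.Dict String (List String)) (k : String) (c : String) :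
    (if d.contains k then d else d.insert k []).modify k [] (· ++ [c]) = d.modify k [] (· ++ [c]) := by
  by_cases h : d.contains k = true
  · simp [h]
  · simp only [Bool.not_eq_true] at h
    simp [h, PySem.Dict.modify, PySem.Dict.getD_insert_self,
      PySem.Dict.insert_insert_self, PySem.Dict.getD_of_not_contains d [] h]

-- A's loop body, expressed through B's parser
theorem pvStepA_eq (d : PySem.Dict String (List String)) (line : String) :
    pvStepA d line = (pvParse line).elim d (fun p => d.modify p.1 [] (· ++ [p.2])) := by
  unfold pvStepA pvParse
  by_cases h : (pvSplit (PySem.Str.strip line) ",").length < 2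
  · simp [h, Nat.not_le.mpr h]
  · simp only [if_neg h, if_pos (Nat.le_of_not_lt h), Option.elim_some]
    exact pvStep_eq_modify _ _ _

-- A's line loop is the pair loop over the parsed pairs
theorem pvFold_lines (lines : List String) (d : PySem.Dict String (List String)) :
    lines.foldl pvStepA d
    = (lines.filterMap pvParse).foldl (fun d p => d.modify p.1 [] (· ++ [p.2])) d := by
  induction lines generalizing d with
  | nil => rfl
  | cons line rest ih =>
    rw [List.foldl_cons, List.filterMap_cons, pvStepA_eq]
    cases hp : pvParse line <;> simp [ih]

-- ===== VERDICT (by name: the statement is the Claim_ definition above) =====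
theorem load_captions_spec : Claim_equal_load_captions := by
  intro captions _
  show load_captions captions = load_captions_alt captions
  unfold load_captions load_captions_alt
  rw [pvFold_lines]
  set ps := ((pvSplit (PySem.Str.strip captions) "\n").filterMap pvParse) with hps
  have hnd : ((ps.foldl (fun d p => d.modify p.1 [] (· ++ [p.2])) PySem.Dict.empty).keys).Nodup := by
    have := PySem.Dict.nodup_keys_foldl_modify_key ps (fun p => p.1) []
      (fun _ p => (· ++ [p.2])) PySem.Dict.empty (by simp [PySem.Dict.keys_empty])
    simpa using this
  rw [PySem.Dict.items_eq_map_keys _ hnd []]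
  have hkeys : (ps.foldl (fun d p => d.modify p.1 [] (· ++ [p.2])) PySem.Dict.empty).keys
      = PySem.List.dedup (ps.map (·.1)) := by
    have := PySem.Dict.keys_foldl_modify_key ps (fun p => p.1) []
      (fun _ p => (· ++ [p.2])) PySem.Dict.empty
    simpa [PySem.Dict.keys_empty, PySem.Set.update_nil_left, PySem.List.dedup_eq_ofList] using this
  rw [hkeys]
  refine List.map_congr_left (fun k _ => ?_)
  have := PySem.Dict.getD_foldl_modify_append ps PySem.Dict.empty k
  simp [PySem.Dict.getD_empty] at this
  simp [this]
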